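-- pv_equiv track=rewrite | github.com/Lautarostuve/LexerPY | algoritmolexer.py | automatafunc
-- ===== SOURCE A (Python) =====
-- ESTADO_FINAL="Estado final"
--
-- ESTADO_TRAMPA="Estado trampa"
--
-- ESTADO_NO_FINAL="Estado aceptado"
--
-- def automatafunc(lexema):
--     estado = 0
--     estados_finales = [20]
--     for caracter in lexema:
--         if estado == 0 and caracter == 'f':
--             estado =  13
--         elif estado == 13 and caracter == 'u':
--             estado = 18
--         elif estado == 18 and caracter == 'n':
--             estado = 19
--         elif estado == 19 and caracter == 'c':
--             estado = 20
--         else: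
--             estado =-1
--             break
--
--     if estado == -1:
--         return ESTADO_TRAMPA
--     elif estado in estados_finales:
--         return ESTADO_FINAL
--     else:
--         return ESTADO_NO_FINAL
-- ===== SOURCE B (Python) =====
-- ESTADO_FINAL="Estado final"
--
-- ESTADO_TRAMPA="Estado trampa"
--
-- ESTADO_NO_FINAL="Estado aceptado"
--
-- def automatafunc(lexema):
--     if lexema == 'func':
--         return ESTADO_FINAL
--     elif 'func'.startswith(lexema):
--         return ESTADO_NO_FINAL
--     else:
--         return ESTADO_TRAMPA
-- ===== Notes on version B (the rewrite author's own statement) =====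
-- stated objective: simpler
-- what changed: Replaces the per-character DFA state loop with a direct classification: equality with 'func' gives the final state, a proper prefix of 'func' gives the non-final state, anything else the trap state.
import Mathlib
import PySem

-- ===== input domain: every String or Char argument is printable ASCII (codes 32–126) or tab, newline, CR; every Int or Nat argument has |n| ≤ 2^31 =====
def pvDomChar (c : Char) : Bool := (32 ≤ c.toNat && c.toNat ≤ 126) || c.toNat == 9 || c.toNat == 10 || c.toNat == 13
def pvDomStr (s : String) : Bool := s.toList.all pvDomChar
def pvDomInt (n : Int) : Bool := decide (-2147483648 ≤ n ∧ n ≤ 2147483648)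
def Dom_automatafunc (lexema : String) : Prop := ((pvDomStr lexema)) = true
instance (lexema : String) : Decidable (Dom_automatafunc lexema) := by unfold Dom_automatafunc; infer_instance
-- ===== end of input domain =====

-- B replaces the per-character DFA state loop with a direct equality/prefix classification (simpler).


-- ===== PORT A =====
-- A's for-loop with `break`: structural recursion over the characters carrying the state;
-- the final else-branch sets the state to -1 and stops (the break).
def automatafuncLoop : List Char → Int → Int
  | [], estado => estado
  | caracter :: rest, estado =>
    if estado = 0 ∧ caracter = 'f' then automatafuncLoop rest 13
    else if estado = 13 ∧ caracter = 'u' then automatafuncLoop rest 18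
    else if estado = 18 ∧ caracter = 'n' then automatafuncLoop rest 19
    else if estado = 19 ∧ caracter = 'c' then automatafuncLoop rest 20
    else -1

def automatafunc (lexema : String) : String :=
  let estado := automatafuncLoop lexema.toList 0
  let estados_finales : List Int := [20]
  if estado = -1 then "Estado trampa"
  else if estados_finales.contains estado then "Estado final"
  else "Estado aceptado"

-- ===== PORT B =====
def automatafunc_alt (lexema : String) : String :=
  if lexema = "func" then "Estado final"
  else if PySem.Str.startswith "func" lexema then "Estado aceptado"
  else "Estado trampa"

-- ===== PRECONDITION & SPEC =====
def Spec_automatafunc (lexema : String) (out : String) : Prop := out = automatafunc_alt lexema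
instance (lexema : String) (out : String) : Decidable (Spec_automatafunc lexema out) := by unfold Spec_automatafunc; infer_instance

-- ===== CLAIM (what is proved, stated in full; the proofs are below) =====
def Claim_equal_automatafunc : Prop := ∀ (lexema : String), Dom_automatafunc lexema → Spec_automatafunc lexema (automatafunc lexema)

-- ===== LEMMAS AND PROOFS =====

-- The whole classification, stated on the character list both ports reduce to.
theorem automatafunc_key (cs : List Char) :
    (if automatafuncLoop cs 0 = -1 then "Estado trampa"
     else if ([(20 : Int)]).contains (automatafuncLoop cs 0) then "Estado final"
     else "Estado aceptado")
    = (if cs = ['f','u','n','c'] then "Estado final"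
       else if List.isPrefixOf cs ['f','u','n','c'] then "Estado aceptado"
       else "Estado trampa") := by
  rcases cs with _ | ⟨c1, cs⟩
  · simp [automatafuncLoop, List.isPrefixOf]
  by_cases h1 : c1 = 'f'
  · subst h1
    rcases cs with _ | ⟨c2, cs⟩
    · simp [automatafuncLoop, List.isPrefixOf]
    by_cases h2 : c2 = 'u'
    · subst h2
      rcases cs with _ | ⟨c3, cs⟩
      · simp [automatafuncLoop, List.isPrefixOf]
      by_cases h3 : c3 = 'n'
      · subst h3
        rcases cs with _ | ⟨c4, cs⟩
        · simp [automatafuncLoop, List.isPrefixOf]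
        by_cases h4 : c4 = 'c'
        · subst h4
          rcases cs with _ | ⟨c5, cs⟩
          · simp [automatafuncLoop]
          · simp [automatafuncLoop]
        · simp [automatafuncLoop, h4]
      · simp [automatafuncLoop, h3, List.isPrefixOf]
    · simp [automatafuncLoop, h2, List.isPrefixOf]
  · simp [automatafuncLoop, h1, List.isPrefixOf]

-- ===== VERDICT (by name: the statement is the Claim_ definition above) =====
theorem automatafunc_spec : Claim_equal_automatafunc := by
  intro lexema _
  unfold Spec_automatafunc automatafunc automatafunc_alt
  have hstr : (lexema = "func") ↔ (lexema.toList = ['f','u','n','c']) := by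
    constructor
    · intro h; subst h; rfl
    · intro h
      have : lexema.toList = "func".toList := h
      exact String.toList_injective this
  have hsw : PySem.Str.startswith "func" lexema
      = List.isPrefixOf lexema.toList ['f','u','n','c'] := by
    simp [PySem.Str.startswith, PySem.Chars.startswith]
  simp only [hstr, hsw]
  exact automatafunc_key lexema.toList
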